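-- pv_equiv track=rewrite | github.com/danielgoes1996/MCP-ERP | core/shared/classification_guardrails.py | is_valid_sat_code
-- ===== SOURCE A (Python) =====
-- def is_valid_sat_code(sat_code: str) -> bool:
--     """
--     Basic validation for SAT account codes.
--
--     SAT codes follow pattern: XXX or XXX.XX or XXX.XX.XX
--     where XXX are digits.
--
--     Args:
--         sat_code: SAT account code to validate
--
--     Returns:
--         True if valid format, False otherwise
--     """
--     if not isinstance(sat_code, str):
--         return False
--
--     # Remove dots and check if all digits
--     if not sat_code.replace('.', '').isdigit():
--         return False
--
--     # Check structure: must be 3, 6, or 9 digits (plus dots)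
--     parts = sat_code.split('.')
--     if len(parts) > 3:
--         return False
--
--     for part in parts:
--         if not part.isdigit():
--             return False
--         if len(part) < 1 or len(part) > 3:
--             return False
--
--     return True
-- ===== SOURCE B (Python) =====
-- def is_valid_sat_code(sat_code: str) -> bool:
--     """Single forward pass: track current segment length and segment count."""
--     if not isinstance(sat_code, str):
--         return False
--     seg_len = 0
--     seg_count = 1
--     for ch in sat_code:
--         if ch == '.':
--             if not (1 <= seg_len <= 3):
--                 return False
--             seg_count += 1
--             if seg_count > 3:
--                 return False
--             seg_len = 0
--         else:
--             if not ch.isdigit():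
--                 return False
--             seg_len += 1
--             if seg_len > 3:
--                 return False
--     return 1 <= seg_len <= 3
-- ===== Notes on version B (the rewrite author's own statement) =====
-- stated objective: simpler
-- what changed: Replaced A's three passes (replace-dots-then-isdigit, split on '.', per-part validation loop) by a single forward character scan maintaining the current segment length and the segment count.
import Mathlib
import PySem

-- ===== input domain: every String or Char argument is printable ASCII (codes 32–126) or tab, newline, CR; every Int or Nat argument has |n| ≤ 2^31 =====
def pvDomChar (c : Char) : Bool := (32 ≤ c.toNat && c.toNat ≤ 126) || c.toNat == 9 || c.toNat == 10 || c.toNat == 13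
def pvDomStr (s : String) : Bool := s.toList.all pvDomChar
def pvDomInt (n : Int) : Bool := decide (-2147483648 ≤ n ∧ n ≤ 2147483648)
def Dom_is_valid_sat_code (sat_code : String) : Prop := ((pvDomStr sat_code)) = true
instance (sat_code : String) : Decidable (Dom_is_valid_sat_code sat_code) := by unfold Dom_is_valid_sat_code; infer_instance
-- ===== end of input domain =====

-- B replaces A's three passes (strip dots + isdigit, split on '.', per-part loop) by one
-- forward scan keeping the current segment length and the segment count (objective: simpler).

-- ===== PORT A =====
-- literal transliteration of A on the code-point list; PySem.Chars.replace / strIsdigit /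
-- splitOn are the exact forms of str.replace / str.isdigit / str.split
def is_valid_sat_code (sat_code : String) : Bool :=
  if !(PySem.Chars.strIsdigit (PySem.Chars.replace sat_code.toList ['.'] [])) then false
  else
    let parts := PySem.Chars.splitOn sat_code.toList ['.']
    if parts.length > 3 then false
    else parts.all fun part =>
      PySem.Chars.strIsdigit part && !(part.length < 1 || part.length > 3)

-- ===== PORT B =====
-- the forward scan of Source B: state = (remaining chars, current segment length, segments seen)
def satLoop : List Char → Nat → Nat → Bool
  | [], segLen, _ => decide (1 ≤ segLen) && decide (segLen ≤ 3)
  | ch :: rest, segLen, segCount =>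
    if ch == '.' then
      if !(decide (1 ≤ segLen) && decide (segLen ≤ 3)) then false
      else if segCount + 1 > 3 then false
      else satLoop rest 0 (segCount + 1)
    else if !(PySem.Chars.isdigit ch) then false
    else if segLen + 1 > 3 then false
    else satLoop rest (segLen + 1) segCount

def is_valid_sat_code_alt (sat_code : String) : Bool :=
  satLoop sat_code.toList 0 1

-- ===== PRECONDITION & SPEC =====
def Spec_is_valid_sat_code (sat_code : String) (out : Bool) : Prop := out = is_valid_sat_code_alt sat_code
instance (sat_code : String) (out : Bool) : Decidable (Spec_is_valid_sat_code sat_code out) := by unfold Spec_is_valid_sat_code; infer_instance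

-- ===== CLAIM (what is proved, stated in full; the proofs are below) =====
def Claim_equal_is_valid_sat_code : Prop := ∀ (sat_code : String), Dom_is_valid_sat_code sat_code → Spec_is_valid_sat_code sat_code (is_valid_sat_code sat_code)

-- ===== LEMMAS AND PROOFS =====

-- reference split on '.': (first segment, remaining segments)
def splitDot : List Char → List Char × List (List Char)
  | [] => ([], [])
  | c :: r =>
    let (p, ps) := splitDot r
    if c = '.' then ([], p :: ps) else (c :: p, ps)

theorem replace_go_dot (fuel : Nat) (l acc : List Char) (h : l.length ≤ fuel) :
    PySem.Chars.replace.go ['.'] [] fuel l acc = acc.reverse ++ l.filter (· ≠ '.') := by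
  induction fuel generalizing l acc with
  | zero =>
    have hl : l = [] := by cases l <;> simp_all
    subst hl
    simp [PySem.Chars.replace.go]
  | succ n ih =>
    cases l with
    | nil => simp [PySem.Chars.replace.go]
    | cons c t =>
      have ht : t.length ≤ n := by simpa using h
      have hpre : (List.isPrefixOf ['.'] (c :: t)) = ('.' = c) := by
        simp [List.isPrefixOf]
      rw [PySem.Chars.replace.go]
      by_cases hc : c = '.'
      · subst hc
        rw [if_pos (by simp)]
        simp [ih t acc ht]
      · rw [if_neg (by simp [hpre]; exact fun h' => hc h'.symm)]
        rw [ih t (c :: acc) ht]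
        simp [hc]

theorem replace_dot (l : List Char) :
    PySem.Chars.replace l ['.'] [] = l.filter (· ≠ '.') := by
  rw [PySem.Chars.replace]
  rw [if_neg (by simp)]
  simpa using replace_go_dot l.length l [] (le_refl _)

theorem splitOn_go_dot (fuel : Nat) (l cur : List Char) (acc : List (List Char))
    (h : l.length ≤ fuel) :
    PySem.Chars.splitOn.go ['.'] fuel l cur acc =
      acc.reverse ++ ((cur.reverse ++ (splitDot l).1) :: (splitDot l).2) := by
  induction fuel generalizing l cur acc with
  | zero =>
    have hl : l = [] := by cases l <;> simp_all
    subst hl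
    simp [PySem.Chars.splitOn.go, splitDot]
  | succ n ih =>
    cases l with
    | nil => simp [PySem.Chars.splitOn.go, splitDot]
    | cons c t =>
      have ht : t.length ≤ n := by simpa using h
      have hpre : (List.isPrefixOf ['.'] (c :: t)) = ('.' = c) := by
        simp [List.isPrefixOf]
      rw [PySem.Chars.splitOn.go]
      by_cases hc : c = '.'
      · subst hc
        rw [if_pos (by simp)]
        simp only [List.drop, List.length]
        rw [ih t [] (cur.reverse :: acc) ht]
        simp [splitDot]
      · rw [if_neg (by simp [hpre]; exact fun h' => hc h'.symm)]
        rw [ih t (c :: cur) acc ht]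
        simp [splitDot, hc]

theorem splitOn_dot (l : List Char) :
    PySem.Chars.splitOn l ['.'] = (splitDot l).1 :: (splitDot l).2 := by
  rw [PySem.Chars.splitOn, splitOn_go_dot (l.length+1) l [] [] (by omega)]
  simp

theorem filter_dot_eq (l : List Char) :
    l.filter (· ≠ '.') = (splitDot l).1 ++ (splitDot l).2.flatten := by
  induction l with
  | nil => simp [splitDot]
  | cons c t ih =>
    by_cases hc : c = '.'
    · subst hc; simpa [splitDot] using ih
    · simp only [splitDot, hc, if_false, List.filter_cons]
      simpa [hc] using congrArg (c :: ·) ih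

-- "is a valid segment": 1–3 characters, all digits
def goodSeg (p : List Char) : Bool :=
  decide (1 ≤ p.length) && decide (p.length ≤ 3) && p.all PySem.Chars.isdigit

theorem satLoop_spec (l : List Char) (segLen segCount : Nat)
    (h1 : segLen ≤ 3) (h2 : segCount ≤ 3) :
    satLoop l segLen segCount =
      ((decide (1 ≤ segLen + (splitDot l).1.length) &&
        decide (segLen + (splitDot l).1.length ≤ 3) &&
        (splitDot l).1.all PySem.Chars.isdigit) &&
       decide (segCount + (splitDot l).2.length ≤ 3) &&
       (splitDot l).2.all goodSeg) := by
  induction l generalizing segLen segCount with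
  | nil =>
    simp [satLoop, splitDot]
    omega
  | cons c t ih =>
    by_cases hc : c = '.'
    · subst hc
      simp only [satLoop, beq_self_eq_true, if_true, splitDot]
      by_cases hs : 1 ≤ segLen ∧ segLen ≤ 3
      · rw [if_neg (by simp [hs.1, hs.2])]
        by_cases hcnt : segCount + 1 > 3
        · rw [if_pos hcnt]
          simp [hs.1, hs.2]
          omega
        · rw [if_neg hcnt]
          rw [ih 0 (segCount+1) (by omega) (by omega)]
          have e1 : segCount + ((splitDot t).2.length + 1) = segCount + 1 + (splitDot t).2.length := by omega
          simp only [Nat.zero_add, List.all_cons, List.length_cons, List.all_nil,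
            List.length_nil, Nat.add_zero, goodSeg, e1, hs.1, hs.2, decide_true,
            Bool.true_and, Bool.and_true]
          simp only [Bool.and_comm, Bool.and_left_comm, Bool.and_assoc]
      · rw [if_pos (by simp; omega)]
        simp
        omega
    · have hb : (c == '.') = false := by simp [hc]
      simp only [satLoop, hb, if_false, splitDot, hc]
      by_cases hd : PySem.Chars.isdigit c
      · rw [if_neg (by simp)]
        by_cases hl : segLen + 1 > 3
        · rw [if_pos hl]
          simp
          omega
        · rw [if_neg hl]
          rw [ih (segLen+1) segCount (by omega) h2]
          have e1 : segLen + ((splitDot t).1.length + 1) = segLen + 1 + (splitDot t).1.length := by omega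
          simp only [List.all_cons, List.length_cons, hd, Bool.true_and, e1, Bool.not_true,
            Bool.false_eq_true, if_false]
      · have hd' : PySem.Chars.isdigit c = false := by simpa using hd
        simp [List.all_cons, hd']

theorem goodA_eq (q : List Char) :
    (PySem.Chars.strIsdigit q && !(decide (q.length < 1) || decide (q.length > 3))) = goodSeg q := by
  by_cases h0 : q = []
  · subst h0; simp [goodSeg, PySem.Chars.strIsdigit]
  · have he : q.isEmpty = false := by simp [h0]
    have hl : 1 ≤ q.length := by
      cases q with
      | nil => exact absurd rfl h0
      | cons a t => simp
    have d1 : (decide (q.length < 1)) = false := by simp; omega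
    have d2 : (decide (1 ≤ q.length)) = true := by simp [hl]
    have d3 : (!decide (q.length > 3)) = decide (q.length ≤ 3) := by
      by_cases h : q.length > 3 <;> simp [h]
      omega
    simp only [PySem.Chars.strIsdigit, goodSeg, he, Bool.not_false, Bool.true_and, d1,
      Bool.false_or, d2, d3]
    rw [Bool.and_comm]

theorem concat_digits (p : List Char) (ps : List (List Char))
    (hp : goodSeg p = true) (hps : ps.all goodSeg = true) :
    PySem.Chars.strIsdigit (p ++ ps.flatten) = true := by
  simp only [PySem.Chars.strIsdigit, goodSeg, List.all_eq_true, Bool.and_eq_true,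
    decide_eq_true_eq] at *
  obtain ⟨⟨hp1, _⟩, hp3⟩ := hp
  constructor
  · cases p with
    | nil => simp at hp1
    | cons a t => simp
  · intro c hc
    simp only [List.mem_append, List.mem_flatten] at hc
    rcases hc with h | ⟨q, hq, hcq⟩
    · exact hp3 c h
    · exact ((hps q hq).2) c hcq

theorem main_eq (s : String) : is_valid_sat_code s = is_valid_sat_code_alt s := by
  unfold is_valid_sat_code is_valid_sat_code_alt
  rw [replace_dot, splitOn_dot, satLoop_spec _ 0 1 (by omega) (by omega)]
  rw [filter_dot_eq]
  set p := (splitDot s.toList).1 with hp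
  set ps := (splitDot s.toList).2 with hps
  have hrhs : (decide (1 ≤ 0 + p.length) && decide (0 + p.length ≤ 3) && p.all PySem.Chars.isdigit &&
      decide (1 + ps.length ≤ 3) && ps.all goodSeg) =
      (goodSeg p && decide (1 + ps.length ≤ 3) && ps.all goodSeg) := by
    simp [goodSeg, Bool.and_assoc]
  rw [hrhs]
  by_cases h1 : PySem.Chars.strIsdigit (p ++ ps.flatten) = true
  · rw [if_neg (by simp [h1])]
    by_cases h2 : (p :: ps).length > 3
    · rw [if_pos h2]
      have hc : (decide (1 + ps.length ≤ 3)) = false := by simp at h2 ⊢; omega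
      simp [hc]
    · rw [if_neg h2]
      simp only [List.all_cons, goodA_eq]
      have hc : (decide (1 + ps.length ≤ 3)) = true := by simp at h2 ⊢; omega
      simp only [hc, Bool.and_true]
  · rw [if_pos (by simpa using h1)]
    by_cases hg : (goodSeg p && decide (1 + ps.length ≤ 3) && ps.all goodSeg) = true
    · exact absurd (concat_digits p ps (by simp_all) (by simp_all)) h1
    · simp only [Bool.not_eq_true] at hg
      exact hg.symm

-- ===== VERDICT (by name: the statement is the Claim_ definition above) =====
theorem is_valid_sat_code_spec : Claim_equal_is_valid_sat_code := by
  intro s _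
  exact main_eq s
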